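-- pv_equiv track=rewrite | github.com/YajingSun-Group/LUMIA | fine-tuning/utils/dataset.py | construct_smask
-- ===== SOURCE A (Python) =====
-- def construct_smask(masked_list, N):
--     smask_list = []
--     for i in range(N):
--         if i in masked_list:
--             smask_list.append(0)
--         else:
--             smask_list.append(1)
--
--     return smask_list
-- ===== SOURCE B (Python) =====
-- def construct_smask(masked_list, N):
--     smask = [1] * N
--     for m in masked_list:
--         if 0 <= m < N:
--             smask[m] = 0
--     return smask
-- ===== Notes on version B (the rewrite author's own statement) =====
-- stated objective: faster
-- what changed: Instead of testing membership of every index in masked_list (a linear scan per index), B starts from an all-ones list and directly zeroes the positions listed in masked_list, skipping out-of-range entries.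
import Mathlib
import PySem

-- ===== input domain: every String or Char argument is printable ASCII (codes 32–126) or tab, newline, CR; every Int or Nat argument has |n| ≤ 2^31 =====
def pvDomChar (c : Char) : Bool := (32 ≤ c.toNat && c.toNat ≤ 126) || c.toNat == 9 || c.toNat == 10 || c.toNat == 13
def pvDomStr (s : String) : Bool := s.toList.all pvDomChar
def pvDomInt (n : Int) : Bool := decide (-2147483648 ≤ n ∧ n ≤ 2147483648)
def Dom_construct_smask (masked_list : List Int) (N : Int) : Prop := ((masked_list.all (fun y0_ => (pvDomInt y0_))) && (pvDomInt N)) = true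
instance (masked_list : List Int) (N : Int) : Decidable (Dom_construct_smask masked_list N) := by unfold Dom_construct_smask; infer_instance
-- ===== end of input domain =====

-- B builds the all-ones mask once and zeroes only the listed in-range positions,
-- replacing A's per-index membership scan (objective: faster, O(N+M) vs O(N*M)).

-- ===== PORT A =====
-- loop 'for i in range(N): append(0 if i in masked_list else 1)'
def construct_smask (masked_list : List Int) (N : Int) : List Int :=
  List.foldl
    (fun smask_list i =>
      if masked_list.contains i then smask_list ++ [(0 : Int)] else smask_list ++ [(1 : Int)])
    [] (PySem.List.pyRange 0 N 1)

-- ===== PORT B =====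
-- loop body of Source B: 'if 0 <= m < N: smask[m] = 0'
def maskStep (N : Int) (smask : List Int) (m : Int) : List Int :=
  if 0 ≤ m ∧ m < N then smask.set m.toNat 0 else smask

def construct_smask_alt (masked_list : List Int) (N : Int) : List Int :=
  masked_list.foldl (maskStep N) (List.replicate N.toNat (1 : Int))

-- ===== PRECONDITION & SPEC =====
def Spec_construct_smask (masked_list : List Int) (N : Int) (out : List Int) : Prop := out = construct_smask_alt masked_list N
instance (masked_list : List Int) (N : Int) (out : List Int) : Decidable (Spec_construct_smask masked_list N out) := by unfold Spec_construct_smask; infer_instance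

-- ===== CLAIM (what is proved, stated in full; the proofs are below) =====
def Claim_equal_construct_smask : Prop := ∀ (masked_list : List Int) (N : Int), Dom_construct_smask masked_list N → Spec_construct_smask masked_list N (construct_smask masked_list N)

-- ===== LEMMAS AND PROOFS =====

lemma foldl_app (f : Int → Int) (xs acc : List Int) :
    List.foldl (fun a i => a ++ [f i]) acc xs = acc ++ xs.map f := by
  induction xs generalizing acc with
  | nil => simp
  | cons x xs ih => simp only [List.foldl, List.map]; rw [ih]; simp

lemma construct_smask_eq_map (ml : List Int) (N : Int) :
    construct_smask ml N
      = (PySem.List.pyRange 0 N 1).map (fun i => if ml.contains i then (0 : Int) else 1) := by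
  unfold construct_smask
  have hfun : (fun (a : List Int) (i : Int) =>
      if ml.contains i then a ++ [(0 : Int)] else a ++ [(1 : Int)])
      = fun a i => a ++ [if ml.contains i then (0 : Int) else 1] := by
    funext a i; split <;> rfl
  rw [hfun, foldl_app]; simp

lemma maskStep_length (N : Int) (acc : List Int) (m : Int) :
    (maskStep N acc m).length = acc.length := by
  unfold maskStep; split <;> simp

lemma foldl_maskStep_length (ml : List Int) (N : Int) (acc : List Int) :
    (List.foldl (maskStep N) acc ml).length = acc.length := by
  induction ml generalizing acc with
  | nil => rfl
  | cons m ml ih => simp only [List.foldl]; rw [ih, maskStep_length]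

lemma foldl_maskStep_getElem (ml : List Int) (N : Int) (acc : List Int)
    (hacc : acc.length = N.toNat) (i : Nat) (hi : i < acc.length) :
    (List.foldl (maskStep N) acc ml)[i]'(by rw [foldl_maskStep_length]; exact hi)
      = if ml.contains (i : Int) then 0 else acc[i]'hi := by
  induction ml generalizing acc with
  | nil => simp
  | cons m ml ih =>
    simp only [List.foldl]
    have hlen := maskStep_length N acc m
    rw [ih (maskStep N acc m) (by rw [hlen, hacc]) (by rw [hlen]; exact hi)]
    have hiN : (i : Int) < N := by
      have h0 : 0 < N.toNat := by omega
      have := Int.toNat_of_nonneg (by omega : (0:Int) ≤ N)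
      omega
    simp only [List.contains_cons]
    by_cases hml : (i : Int) ∈ ml
    · simp [hml]
    · by_cases hm : (i : Int) = m
      · subst hm
        have hstep : maskStep N acc (i : Int) = acc.set i 0 := by
          unfold maskStep
          rw [if_pos ⟨Int.natCast_nonneg i, hiN⟩]
          simp
        simp [hml, hstep]
      · by_cases hg : (0 : Int) ≤ m ∧ m < N
        · have hne : m.toNat ≠ i := by omega
          simp [maskStep, hg, hml, hm, hne]
        · simp [maskStep, hg, hml, hm]

-- ===== VERDICT (by name: the statement is the Claim_ definition above) =====
theorem construct_smask_spec : Claim_equal_construct_smask := by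
  unfold Claim_equal_construct_smask
  intro ml N _
  unfold Spec_construct_smask
  rw [construct_smask_eq_map]
  apply List.ext_getElem
  · simp [construct_smask_alt, foldl_maskStep_length, PySem.List.length_pyRange_one]
  · intro i h1 h2
    have hi : i < (List.replicate N.toNat (1 : Int)).length := by
      have := foldl_maskStep_length ml N (List.replicate N.toNat (1 : Int))
      simp_all [construct_smask_alt]
    rw [List.getElem_map, PySem.List.getElem_pyRange_one]
    have hB : (construct_smask_alt ml N)[i]'h2
        = if ml.contains (i : Int) then 0 else (List.replicate N.toNat (1 : Int))[i]'hi :=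
      foldl_maskStep_getElem ml N _ (by simp) i hi
    rw [hB]
    simp
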